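-- pv_equiv track=rewrite | github.com/garlic0000/PaperReproduce | Bit_plane_slicing_and_Rainbowcode/Userdefine.py | get_minp_maxp
-- ===== SOURCE A (Python) =====
-- def get_minp_maxp(pixnumlist, Lmin, Lmax):
--     # 获取图像中灰度的最小值
--     if (Lmin < 0 or Lmin > 255) or (Lmax < 0 or Lmax > 255) or (Lmin > Lmax):
--         exit("给定的像素范围有问题")
--     minpos = -1
--     maxpos = 256
--     for i in range(Lmin, Lmax + 1):
--         if pixnumlist[i] != 0:
--             minpos = i
--             break
--     for i in range(Lmax, Lmin - 1, -1):
--         if pixnumlist[i] != 0: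
--             maxpos = i
--             break
--     return minpos, maxpos
-- ===== SOURCE B (Python) =====
-- def get_minp_maxp(pixnumlist, Lmin, Lmax):
--     if (Lmin < 0 or Lmin > 255) or (Lmax < 0 or Lmax > 255) or (Lmin > Lmax):
--         exit("给定的像素范围有问题")
--     hits = [i for i in range(Lmin, Lmax + 1) if pixnumlist[i] != 0]
--     return (hits[0], hits[-1]) if hits else (-1, 256)
-- ===== Notes on version B (the rewrite author's own statement) =====
-- stated objective: simpler
-- what changed: The two directional break-scans are replaced by one comprehension that collects all nonzero indices in the range once, returning its first and last element (defaults (-1,256) preserved).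
import Mathlib
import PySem

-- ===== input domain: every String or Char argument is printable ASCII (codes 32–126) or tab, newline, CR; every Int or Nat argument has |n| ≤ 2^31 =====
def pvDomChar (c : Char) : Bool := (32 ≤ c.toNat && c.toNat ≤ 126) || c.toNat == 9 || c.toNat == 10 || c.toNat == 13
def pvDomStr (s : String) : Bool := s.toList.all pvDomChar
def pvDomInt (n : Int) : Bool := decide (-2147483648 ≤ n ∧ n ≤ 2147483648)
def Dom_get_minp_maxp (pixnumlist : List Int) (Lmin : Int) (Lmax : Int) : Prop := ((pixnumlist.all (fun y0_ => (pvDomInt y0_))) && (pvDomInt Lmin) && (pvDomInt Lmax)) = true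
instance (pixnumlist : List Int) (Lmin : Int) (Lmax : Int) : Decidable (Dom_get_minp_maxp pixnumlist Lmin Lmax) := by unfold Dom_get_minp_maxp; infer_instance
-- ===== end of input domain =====

-- B replaces A's two directional break-scans by one comprehension collecting all
-- nonzero indices in the range, returning its first and last (objective: simpler decomposition).

-- ===== PORT A =====
-- A's 'for i in range(...): if pixnumlist[i] != 0: <pos> = i; break' loop.
-- pyGetD 0 stands for pixnumlist[i]; out-of-range indexing (Python: IndexError) is excluded by Pre_.
def pvFirstNonzero (xs : List Int) : List Int → Int → Int
  | [], dflt => dflt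
  | i :: rest, dflt =>
      if PySem.List.pyGetD xs i 0 ≠ 0 then i else pvFirstNonzero xs rest dflt

-- On a bad range Python calls exit() (SystemExit); excluded by Pre_, the port returns the defaults there.
def get_minp_maxp (pixnumlist : List Int) (Lmin : Int) (Lmax : Int) : Int × Int :=
  if (Lmin < 0 ∨ 255 < Lmin) ∨ (Lmax < 0 ∨ 255 < Lmax) ∨ Lmax < Lmin then (-1, 256)
  else
    (pvFirstNonzero pixnumlist (PySem.List.pyRange Lmin (Lmax + 1) 1) (-1),
     pvFirstNonzero pixnumlist (PySem.List.pyRange Lmax (Lmin - 1) (-1)) 256)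

-- ===== PORT B =====
-- [i for i in range(Lmin, Lmax + 1) if pixnumlist[i] != 0]; pyGetD 0 stands for
-- pixnumlist[i] (out-of-range indexing, Python IndexError, is excluded by Pre_).
def pvHits (pixnumlist : List Int) (Lmin : Int) (Lmax : Int) : List Int :=
  (PySem.List.pyRange Lmin (Lmax + 1) 1).filter
    (fun i => PySem.List.pyGetD pixnumlist i 0 ≠ 0)

def get_minp_maxp_alt (pixnumlist : List Int) (Lmin : Int) (Lmax : Int) : Int × Int :=
  if (Lmin < 0 ∨ 255 < Lmin) ∨ (Lmax < 0 ∨ 255 < Lmax) ∨ Lmax < Lmin then (-1, 256)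
  else
    match pvHits pixnumlist Lmin Lmax with
    | [] => (-1, 256)                        -- no hits: the defaults
    | h :: t => (h, t.getLastD h)            -- hits[0], hits[-1]

-- ===== PRECONDITION & SPEC =====
-- Pre_ excludes exactly the inputs where Python A raises: a range failing the guard
-- (SystemExit) and Lmax ≥ len(pixnumlist) (IndexError in the scans; B raises there too).
def Pre_get_minp_maxp (pixnumlist : List Int) (Lmin : Int) (Lmax : Int) : Prop :=
  0 ≤ Lmin ∧ Lmin ≤ Lmax ∧ Lmax ≤ 255 ∧ Lmax < (pixnumlist.length : Int)
instance (pixnumlist : List Int) (Lmin : Int) (Lmax : Int) : Decidable (Pre_get_minp_maxp pixnumlist Lmin Lmax) := by unfold Pre_get_minp_maxp; infer_instance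

def pvWitness_get_minp_maxp : List Int × Int × Int := ([0, 5, 0, 7], 0, 3)

def Spec_get_minp_maxp (pixnumlist : List Int) (Lmin : Int) (Lmax : Int) (out : Int × Int) : Prop := out = get_minp_maxp_alt pixnumlist Lmin Lmax
instance (pixnumlist : List Int) (Lmin : Int) (Lmax : Int) (out : Int × Int) : Decidable (Spec_get_minp_maxp pixnumlist Lmin Lmax out) := by unfold Spec_get_minp_maxp; infer_instance

-- ===== CLAIM (what is proved, stated in full; the proofs are below) =====
def Claim_equal_get_minp_maxp : Prop := ∀ (pixnumlist : List Int) (Lmin : Int) (Lmax : Int), Dom_get_minp_maxp pixnumlist Lmin Lmax → Pre_get_minp_maxp pixnumlist Lmin Lmax → Spec_get_minp_maxp pixnumlist Lmin Lmax (get_minp_maxp pixnumlist Lmin Lmax)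

-- ===== LEMMAS AND PROOFS =====

-- A's break-scan returns the head of the filtered index list (default if none).
theorem pvFirstNonzero_eq_headD (xs : List Int) (idxs : List Int) (dflt : Int) :
    pvFirstNonzero xs idxs dflt
      = ((idxs.filter (fun i => PySem.List.pyGetD xs i 0 ≠ 0)).head?).getD dflt := by
  induction idxs with
  | nil => simp [pvFirstNonzero]
  | cons i rest ih =>
      by_cases h : PySem.List.pyGetD xs i 0 ≠ 0 <;>
        simp [pvFirstNonzero, h, ih]

-- ===== VERDICT (by name: the statement is the Claim_ definition above) =====
theorem get_minp_maxp_spec : Claim_equal_get_minp_maxp := by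
  intro xs Lmin Lmax _ hpre
  obtain ⟨h1, h2, h3, h4⟩ := hpre
  have hguard : ¬ ((Lmin < 0 ∨ 255 < Lmin) ∨ (Lmax < 0 ∨ 255 < Lmax) ∨ Lmax < Lmin) := by omega
  unfold Spec_get_minp_maxp get_minp_maxp get_minp_maxp_alt
  rw [if_neg hguard, if_neg hguard]
  have hrev : PySem.List.pyRange Lmax (Lmin - 1) (-1)
      = (PySem.List.pyRange Lmin (Lmax + 1) 1).reverse := by
    rw [PySem.List.pyRange_neg_one_eq_reverse]
    congr 1 <;> ring_nf
  rw [pvFirstNonzero_eq_headD, pvFirstNonzero_eq_headD, hrev,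
      List.filter_reverse, List.head?_reverse]
  show (_, _) = _
  unfold pvHits
  set F := (PySem.List.pyRange Lmin (Lmax + 1) 1).filter
      (fun i => PySem.List.pyGetD xs i 0 ≠ 0) with hF
  cases F with
  | nil => simp
  | cons h t => simp [List.getLast?_cons]
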